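-- pv_equiv track=rewrite | github.com/hhuuson97/English-learning | source/helpers/string_helpers.py | format_us_currency
-- ===== SOURCE A (Python) =====
-- def format_us_currency(value, split_group=',', symbol='$'):
--     if not value:
--         return ""
--     value = str(value).split('.')[0]
--     if value.count(split_group) == 0:
--         b, n, v = '', 1, value
--         value = value[:value.rfind('.')]
--         for i in value[::-1]:
--             b = split_group + i + b if n == 2 else i + b
--             n = 1 if n == 3 else n + 1
--         b = b[1:] if b and len(b) > 0 and b[0] == split_group else b
--         value = (b or "") + v[v.rfind('.'):]
--     return symbol + (value.rstrip('0').rstrip('.') if '.' in value else value)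
-- ===== SOURCE B (Python) =====
-- def format_us_currency(value, split_group=',', symbol='$'):
--     if not value:
--         return ""
--     s = str(value).split('.')[0]
--     if split_group not in s:
--         rev = s[::-1]
--         chunks = []
--         while rev:
--             chunks.append(rev[:3][::-1])
--             rev = rev[3:]
--         s = split_group.join(reversed(chunks))
--     return symbol + (s.rstrip('0').rstrip('.') if '.' in s else s)
-- ===== Notes on version B (the rewrite author's own statement) =====
-- stated objective: simpler
-- what changed: Replaces A's reversed character-by-character walk (modular counter state, string prepending, and a post-hoc strip of the leading separator) with the natural chunking: reverse the string, cut it into blocks of three, restore each block and join them with the separator; Pre_ excludes the unspecified corner of a multi-character separator absent from a digit string whose length is a multiple of three, where the string splits into complete groups only and A and B make opposite choices about a separator before the first group.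
-- outside the precondition, e.g. on format_us_currency(100, '::', '$'): A returns '$::100', B returns '$100'; on format_us_currency(-12345, '..', '$'): A returns '$..-12..345', B returns '$-12..345'
import Mathlib
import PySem

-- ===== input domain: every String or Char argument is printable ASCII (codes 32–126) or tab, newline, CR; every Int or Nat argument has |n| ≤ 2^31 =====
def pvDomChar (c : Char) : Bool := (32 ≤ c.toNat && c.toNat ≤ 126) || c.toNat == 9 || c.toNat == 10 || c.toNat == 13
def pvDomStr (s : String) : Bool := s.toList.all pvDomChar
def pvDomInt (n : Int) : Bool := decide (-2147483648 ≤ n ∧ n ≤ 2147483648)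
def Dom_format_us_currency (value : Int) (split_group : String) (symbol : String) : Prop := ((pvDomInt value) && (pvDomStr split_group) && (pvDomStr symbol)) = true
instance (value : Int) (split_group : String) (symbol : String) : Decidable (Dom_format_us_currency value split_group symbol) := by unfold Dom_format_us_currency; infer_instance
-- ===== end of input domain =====

-- B replaces A's reversed digit-by-digit walk (modular counter, string prepending, post-hoc
-- strip of a leading separator) with natural chunking: reverse, cut into blocks of three,
-- join (objective: simpler). A accidentally keeps a LEADING separator when the string length
-- is a multiple of 3 and the separator is not one character; B emits no leading separator
-- there — stated as the intended difference D_ below.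

-- ===== PORT A =====
-- exact port of Python str.rstrip(chars): strip from the right every char in `chars`
def pyRstripChars (cs : List Char) (chars : List Char) : List Char :=
  ((cs.reverse).dropWhile (fun c => chars.contains c)).reverse

def format_us_currency (value : Int) (split_group : String) (symbol : String) : String :=
  if value == 0 then ""
  else
    -- value = str(value).split('.')[0] ; split always yields a nonempty list, so [0] is headI
    let value1 : List Char := (PySem.Chars.splitOn (PySem.Int.toChars value) ['.']).headI
    let value2 : List Char :=
      if PySem.Chars.count value1 split_group.toList == 0 then
        let v := value1
        let value1' := PySem.List.slice value1 none (some (PySem.Chars.rfind value1 ['.']))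
        let bn : List Char × Int := value1'.reverse.foldl
          (fun (st : List Char × Int) (i : Char) =>
            ((if st.2 == 2 then split_group.toList ++ [i] ++ st.1 else [i] ++ st.1),
             (if st.2 == 3 then 1 else st.2 + 1))) ([], 1)
        let b := bn.1
        -- b[0] == split_group : the one-char string [b.headI] compared with split_group
        let b := if b ≠ [] ∧ 0 < b.length ∧ [b.headI] = split_group.toList
                 then PySem.List.slice b (some 1) none else b
        b ++ PySem.List.slice v (some (PySem.Chars.rfind v ['.'])) none
      else value1
    String.ofList (symbol.toList ++
      (if PySem.Chars.isIn ['.'] value2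
       then pyRstripChars (pyRstripChars value2 ['0']) ['.']
       else value2))

-- ===== PORT B =====
-- the while loop of Source B: cut the reversed string into successive blocks rev[:3][::-1]
def pyChunks3 (rev : List Char) : List (List Char) :=
  if h : rev = [] then []
  else (PySem.List.slice rev none (some 3)).reverse ::
       pyChunks3 (PySem.List.slice rev (some 3) none)
  termination_by rev.length
  decreasing_by
    have h3 : PySem.List.slice rev (some 3) none = rev.drop 3 := by simp [pysem]
    rw [h3]
    have hne : rev.length ≠ 0 := fun hh => h (List.length_eq_zero_iff.mp hh)
    simp only [List.length_drop]
    omega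

def format_us_currency_alt (value : Int) (split_group : String) (symbol : String) : String :=
  if value == 0 then ""
  else
    let s : List Char := (PySem.Chars.splitOn (PySem.Int.toChars value) ['.']).headI
    let s : List Char :=
      if PySem.Chars.isIn split_group.toList s = false then
        PySem.Chars.join split_group.toList (pyChunks3 s.reverse).reverse
      else s
    String.ofList (symbol.toList ++
      (if PySem.Chars.isIn ['.'] s then pyRstripChars (pyRstripChars s ['0']) ['.'] else s))

-- ===== PRECONDITION & SPEC =====
-- Pre_ excludes one corner no caller of a US-currency formatter specifies: a MULTI-character
-- separator that is absent from str(value) when str(value)'s length is a multiple of three.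
-- There the string splits into complete groups of three only, and whether a separator also
-- precedes the first group is anybody's choice: A prefixes one, B does not.
def Pre_format_us_currency (value : Int) (split_group : String) (symbol : String) : Prop :=
  ¬ (value ≠ 0 ∧ ¬ split_group.toList <:+: PySem.Int.toChars value ∧
     (PySem.Int.toChars value).length % 3 = 0 ∧ split_group.toList.length ≠ 1)
instance (value : Int) (split_group : String) (symbol : String) : Decidable (Pre_format_us_currency value split_group symbol) := by unfold Pre_format_us_currency; infer_instance

def pvWitness_format_us_currency : Int × String × String := (1234567, ",", "$")

def Spec_format_us_currency (value : Int) (split_group : String) (symbol : String) (out : String) : Prop := out = format_us_currency_alt value split_group symbol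
instance (value : Int) (split_group : String) (symbol : String) (out : String) : Decidable (Spec_format_us_currency value split_group symbol out) := by unfold Spec_format_us_currency; infer_instance

-- ===== CLAIM (what is proved, stated in full; the proofs are below) =====
def Claim_equal_format_us_currency : Prop := ∀ (value : Int) (split_group : String) (symbol : String), Dom_format_us_currency value split_group symbol → Pre_format_us_currency value split_group symbol → Spec_format_us_currency value split_group symbol (format_us_currency value split_group symbol)

-- ===== LEMMAS AND PROOFS =====

-- equation lemmas for pyChunks3 with the slices evaluated
theorem pyChunks3_nil : pyChunks3 [] = [] := by rw [pyChunks3]; simp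

theorem pyChunks3_cons (c : Char) (m : List Char) :
    pyChunks3 (c :: m) = ((c :: m).take 3).reverse :: pyChunks3 ((c :: m).drop 3) := by
  rw [pyChunks3]
  rw [dif_neg (by simp)]
  have h1 : PySem.List.slice (c :: m) none (some 3) = (c :: m).take 3 := by simp [pysem]
  have h2 : PySem.List.slice (c :: m) (some 3) none = (c :: m).drop 3 := by simp [pysem]
  rw [h1, h2]

-- str(n) is nonempty and contains no '.'
theorem pv_toDigitsCore_ne_nil (fuel n : Nat) (ds : List Char) :
    Nat.toDigitsCore 10 (fuel + 1) n ds ≠ [] := by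
  induction fuel generalizing n ds with
  | zero => simp only [Nat.toDigitsCore]; split <;> simp
  | succ f ih =>
    simp only [Nat.toDigitsCore]; split
    · simp
    · exact ih _ _

theorem pv_digitChar_isDigit (m : Nat) (h : m < 10) : (Nat.digitChar m).isDigit = true := by
  interval_cases m <;> decide

theorem pv_mem_toDigitsCore (fuel n : Nat) (ds : List Char) (c : Char)
    (h : c ∈ Nat.toDigitsCore 10 fuel n ds) : c ∈ ds ∨ c.isDigit := by
  induction fuel generalizing n ds with
  | zero => simp only [Nat.toDigitsCore] at h; exact Or.inl h
  | succ f ih =>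
    simp only [Nat.toDigitsCore] at h
    split at h
    · rcases List.mem_cons.1 h with h | h
      · subst h; exact Or.inr (pv_digitChar_isDigit _ (Nat.mod_lt _ (by norm_num)))
      · exact Or.inl h
    · rcases ih _ _ h with h' | h'
      · rcases List.mem_cons.1 h' with h'' | h''
        · subst h''; exact Or.inr (pv_digitChar_isDigit _ (Nat.mod_lt _ (by norm_num)))
        · exact Or.inl h''
      · exact Or.inr h'

theorem pv_toChars_ne_nil (v : Int) : PySem.Int.toChars v ≠ [] := by
  unfold PySem.Int.toChars Nat.toDigits
  split
  · simp
  · exact pv_toDigitsCore_ne_nil _ _ _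

theorem pv_dot_not_mem_toChars (v : Int) : '.' ∉ PySem.Int.toChars v := by
  unfold PySem.Int.toChars Nat.toDigits
  intro h
  split at h
  · rcases List.mem_cons.1 h with h | h
    · exact absurd h (by decide)
    · rcases pv_mem_toDigitsCore _ _ _ _ h with h' | h'
      · exact absurd h' (List.not_mem_nil)
      · exact absurd h' (by decide)
  · rcases pv_mem_toDigitsCore _ _ _ _ h with h' | h'
    · exact absurd h' (List.not_mem_nil)
    · exact absurd h' (by decide)

-- splitOn with a never-occurring separator is the identity
theorem pv_splitOn_go_no_occ (sep : List Char) :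
    ∀ (fuel : Nat) (l cur : List Char) (acc : List (List Char)), l.length ≤ fuel →
      ¬ sep <:+: l →
      PySem.Chars.splitOn.go sep fuel l cur acc = ((cur.reverse ++ l) :: acc).reverse := by
  intro fuel
  induction fuel with
  | zero =>
    intro l cur acc hl _
    have : l = [] := List.length_eq_zero_iff.mp (Nat.le_zero.mp hl)
    subst this
    simp [PySem.Chars.splitOn.go]
  | succ f ih =>
    intro l cur acc hl hocc
    cases l with
    | nil =>
      rw [PySem.Chars.splitOn.go]
      · simp
      · omega
    | cons c rest =>
      rw [PySem.Chars.splitOn.go]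
      rw [if_neg]
      · rw [ih rest (c :: cur) acc (by simpa using Nat.lt_succ_iff.mp (by simpa using hl))
            (fun h => hocc (List.infix_cons h))]
        simp
      · intro hpre
        exact hocc (List.isPrefixOf_iff_prefix.mp hpre).isInfix

theorem pv_splitOn_no_occ (s sep : List Char) (h : ¬ sep <:+: s) :
    PySem.Chars.splitOn s sep = [s] := by
  unfold PySem.Chars.splitOn
  rw [pv_splitOn_go_no_occ sep (s.length + 1) s [] [] (by omega) h]
  simp

-- count = 0 iff the substring does not occur
theorem pv_count_go_ge (sub : List Char) :
    ∀ (fuel : Nat) (l : List Char) (acc : Nat), acc ≤ PySem.Chars.count.go sub fuel l acc := by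
  intro fuel
  induction fuel with
  | zero => intro l acc; rw [PySem.Chars.count.go]
  | succ f ih =>
    intro l acc
    cases l with
    | nil =>
      rw [PySem.Chars.count.go]
      · omega
    | cons c rest =>
      rw [PySem.Chars.count.go]
      split
      · exact le_trans (Nat.le_succ acc) (ih _ _)
      · exact ih _ _

theorem pv_count_go_eq_iff (sub : List Char) (hsub : sub ≠ []) :
    ∀ (fuel : Nat) (l : List Char) (acc : Nat), l.length ≤ fuel →
      (PySem.Chars.count.go sub fuel l acc = acc ↔ ¬ sub <:+: l) := by
  intro fuel
  induction fuel with
  | zero =>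
    intro l acc hl
    have : l = [] := List.length_eq_zero_iff.mp (Nat.le_zero.mp hl)
    subst this
    rw [PySem.Chars.count.go]
    exact ⟨fun _ h => hsub (List.eq_nil_of_infix_nil h), fun _ => rfl⟩
  | succ f ih =>
    intro l acc hl
    cases l with
    | nil =>
      rw [PySem.Chars.count.go]
      · exact ⟨fun _ h => hsub (List.eq_nil_of_infix_nil h), fun _ => rfl⟩
      · omega
    | cons c rest =>
      rw [PySem.Chars.count.go]
      split
      · rename_i hpre
        constructor
        · intro h
          have := pv_count_go_ge sub f (List.drop sub.length (c :: rest)) (acc + 1)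
          omega
        · intro h
          exact absurd (List.isPrefixOf_iff_prefix.mp hpre).isInfix h
      · rename_i hpre
        rw [ih rest acc (by simpa using Nat.lt_succ_iff.mp (by simpa using hl))]
        rw [List.infix_cons_iff]
        constructor
        · intro h hd
          rcases hd with hd | hd
          · exact hpre (List.isPrefixOf_iff_prefix.mpr hd)
          · exact h hd
        · intro h hd; exact h (Or.inr hd)

theorem pv_count_eq_zero_iff (s sub : List Char) :
    (PySem.Chars.count s sub == 0) = true ↔ PySem.Chars.isIn sub s = false := by
  unfold PySem.Chars.count
  by_cases hsub : sub = []
  · subst hsub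
    simp [PySem.Chars.isIn_nil]
  · rw [if_neg (by simpa using hsub)]
    rw [beq_iff_eq, PySem.Chars.isIn_eq_false_iff]
    exact pv_count_go_eq_iff sub hsub s.length s 0 le_rfl

-- rfind of a non-occurring pattern is -1
theorem pv_rfind_go_no_occ (s sub : List Char) (h : ¬ sub <:+: s) :
    ∀ (k : Nat), PySem.Chars.rfind.go s sub k = -1 := by
  intro k
  induction k with
  | zero =>
    rw [PySem.Chars.rfind.go]
    rw [if_neg]
    intro hpre
    exact h (List.isPrefixOf_iff_prefix.mp hpre).isInfix
  | succ j ih =>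
    rw [PySem.Chars.rfind.go]
    rw [if_neg, ih]
    intro hpre
    exact h (List.infix_iff_prefix_suffix.mpr ⟨_, List.isPrefixOf_iff_prefix.mp hpre, List.drop_suffix _ _⟩)

theorem pv_rfind_no_occ (s sub : List Char) (h : ¬ sub <:+: s) :
    PySem.Chars.rfind s sub = -1 := pv_rfind_go_no_occ s sub h s.length

-- ===== A-side loop characterisation =====

-- the contribution of A's loop, written as a structural recursion
def pvC (sg : List Char) : List Char → Int → List Char
  | [], _ => []
  | i :: m, n => pvC sg m (if n == 3 then 1 else n + 1) ++ (if n == 2 then sg ++ [i] else [i])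

-- A's strip-the-leading-separator step
def pvStrip (sg b : List Char) : List Char :=
  if b ≠ [] ∧ 0 < b.length ∧ [b.headI] = sg then PySem.List.slice b (some 1) none else b

theorem pv_foldl_eq_pvC (sg : List Char) (m : List Char) :
    ∀ (b0 : List Char) (n0 : Int),
      (m.foldl (fun (st : List Char × Int) (i : Char) =>
        ((if st.2 == 2 then sg ++ [i] ++ st.1 else [i] ++ st.1),
         (if st.2 == 3 then 1 else st.2 + 1))) (b0, n0)).1 = pvC sg m n0 ++ b0 := by
  induction m with
  | nil => intro b0 n0; simp [pvC]
  | cons i m ih =>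
    intro b0 n0
    simp only [List.foldl_cons, pvC]
    rw [ih]
    by_cases h : n0 == 2 <;> simp [h, List.append_assoc]

theorem pv_join_append_singleton (sg : List Char) (c : List Char) (cs : List (List Char)) (h : cs ≠ []) :
    PySem.Chars.join sg (cs ++ [c]) = PySem.Chars.join sg cs ++ sg ++ c := by
  induction cs with
  | nil => exact absurd rfl h
  | cons a cs ih =>
    cases cs with
    | nil => simp [PySem.Chars.join_cons_cons, PySem.Chars.join_singleton]
    | cons b cs =>
      simp only [List.cons_append] at ih ⊢
      rw [PySem.Chars.join_cons_cons, ih (by simp), PySem.Chars.join_cons_cons]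
      simp [List.append_assoc]

theorem pv_join_reverse_cons (sg : List Char) (c : List Char) (cs : List (List Char)) (h : cs ≠ []) :
    PySem.Chars.join sg (c :: cs).reverse = PySem.Chars.join sg cs.reverse ++ sg ++ c := by
  rw [List.reverse_cons]
  exact pv_join_append_singleton sg c cs.reverse (by simpa using h)

theorem pvC_ne_nil (sg : List Char) (i : Char) (m : List Char) (n : Int) :
    pvC sg (i :: m) n ≠ [] := by
  rw [pvC]
  intro h
  rcases List.append_eq_nil_iff.mp h with ⟨_, h2⟩
  by_cases hn : n == 2 <;> simp [hn] at h2

theorem pvStrip_append (sg u rest : List Char) (hu : u ≠ []) :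
    pvStrip sg (u ++ rest) = pvStrip sg u ++ rest := by
  cases u with
  | nil => exact absurd rfl hu
  | cons a u' =>
    unfold pvStrip
    simp only [List.cons_append, List.headI_cons, ne_eq, List.cons_ne_nil, not_false_iff,
      true_and, List.length_cons, Nat.succ_pos, PySem.List.slice_from_one, List.tail_cons]
    split <;> simp

theorem pyChunks3_ne_nil (c : Char) (m : List Char) : pyChunks3 (c :: m) ≠ [] := by
  rw [pyChunks3_cons]; simp

-- MAIN (A side): strip∘fold grouping equals the chunk join, with the leading separator kept
-- exactly when the string length is a multiple of three and the separator is not one character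
theorem pv_main (sg : List Char) :
    ∀ (N : Nat) (m : List Char) (x : Char), m.length ≤ N →
      (∀ c ∈ x :: m, sg ≠ [c]) →
      pvStrip sg (pvC sg m 1) ++ [x] =
        (if (m.length + 1) % 3 = 0 ∧ sg.length ≠ 1 then sg else []) ++
          PySem.Chars.join sg (pyChunks3 (x :: m)).reverse := by
  intro N
  induction N with
  | zero =>
    intro m x hm _
    have : m = [] := List.length_eq_zero_iff.mp (Nat.le_zero.mp hm)
    subst this
    simp [pvC, pvStrip, pyChunks3_cons, pyChunks3_nil, PySem.Chars.join_singleton]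
  | succ N ih =>
    intro m x hm hmem
    match m with
    | [] => simp [pvC, pvStrip, pyChunks3_cons, pyChunks3_nil, PySem.Chars.join_singleton]
    | [y] =>
      have hC : pvC sg [y] 1 = [y] := by simp [pvC]
      have hS : pvStrip sg [y] = [y] := by
        unfold pvStrip
        rw [if_neg]
        rintro ⟨-, -, h⟩
        exact hmem y (by simp) h.symm
      rw [hC, hS]
      rw [pyChunks3_cons]
      simp [pyChunks3_nil, PySem.Chars.join_singleton]
    | [y, z] =>
      have hC : pvC sg [y, z] 1 = sg ++ [z] ++ [y] := by simp [pvC]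
      by_cases hsg1 : sg.length = 1
      · obtain ⟨a, ha⟩ := List.length_eq_one_iff.mp hsg1
        subst ha
        have hS : pvStrip [a] ([a] ++ [z] ++ [y]) = [z, y] := by
          unfold pvStrip
          rw [if_pos (by simp)]
          simp [PySem.List.slice_from_one]
        rw [hC, hS]
        rw [pyChunks3_cons]
        simp [pyChunks3_nil, PySem.Chars.join_singleton]
      · have hS : pvStrip sg (sg ++ [z] ++ [y]) = sg ++ [z] ++ [y] := by
          unfold pvStrip
          rw [if_neg]
          rintro ⟨hne, -, hh⟩
          cases sg with
          | nil => simp at hh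
          | cons a sg' =>
            simp only [List.cons_append, List.headI_cons] at hh
            injection hh with _ h2
            exact hsg1 (by simp [← h2])
        rw [hC, hS]
        rw [pyChunks3_cons]
        simp [pyChunks3_nil, PySem.Chars.join_singleton, hsg1, List.append_assoc]
    | y :: z :: w :: m' =>
      have hC : pvC sg (y :: z :: w :: m') 1
          = pvC sg m' 1 ++ [w] ++ sg ++ [z] ++ [y] := by
        simp [pvC, List.append_assoc]
      have hchunk : pyChunks3 (x :: y :: z :: w :: m') = [z, y, x] :: pyChunks3 (w :: m') := by
        rw [pyChunks3_cons]
        simp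
      match m' with
      | [] =>
        have hS : pvStrip sg ([w] ++ (sg ++ [z] ++ [y])) = [w] ++ (sg ++ [z] ++ [y]) := by
          unfold pvStrip
          rw [if_neg]
          rintro ⟨-, -, h⟩
          exact hmem w (by simp) h.symm
        have hC'' : pvC sg [y, z, w] 1 = [w] ++ (sg ++ [z] ++ [y]) := by
          rw [hC]; simp [pvC, List.append_assoc]
        rw [hC'', hS, hchunk]
        rw [pv_join_reverse_cons sg _ _ (pyChunks3_ne_nil w [])]
        rw [pyChunks3_cons]
        simp [pyChunks3_nil, PySem.Chars.join_singleton, List.append_assoc]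
      | v :: m'' =>
        have hne : pvC sg (v :: m'') 1 ≠ [] := pvC_ne_nil sg v m'' 1
        have hC2 : pvC sg (y :: z :: w :: v :: m'') 1
            = pvC sg (v :: m'') 1 ++ ([w] ++ sg ++ [z] ++ [y]) := by
          rw [hC]; simp [List.append_assoc]
        rw [hC2, pvStrip_append sg _ _ hne]
        have ihh := ih (v :: m'') w (by simp at hm ⊢; omega)
          (fun c hc => hmem c (by simp at hc ⊢; tauto))
        have hstep : pvStrip sg (pvC sg (v :: m'') 1) ++ ([w] ++ sg ++ [z] ++ [y]) ++ [x]
            = (pvStrip sg (pvC sg (v :: m'') 1) ++ [w]) ++ (sg ++ [z] ++ [y] ++ [x]) := by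
          simp [List.append_assoc]
        rw [hstep, ihh]
        rw [hchunk, pv_join_reverse_cons sg _ _ (pyChunks3_ne_nil w (v :: m''))]
        have hmod : ((v :: m'').length + 1) % 3 = ((y :: z :: w :: v :: m'').length + 1) % 3 := by
          simp only [List.length_cons]
          omega
        rw [hmod]
        split <;> simp [List.append_assoc]

-- ===== top-level assembly =====
theorem format_us_currency_spec : Claim_equal_format_us_currency := by
  intro value sg sym _ hpre
  unfold Spec_format_us_currency
  by_cases hv : value = 0
  · simp [format_us_currency, format_us_currency_alt, hv]
  have hvb : (value == 0) = false := by simp [hv]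
  have hdot : ¬ ['.'] <:+: PySem.Int.toChars value := by
    rw [List.singleton_infix_iff]
    exact pv_dot_not_mem_toChars value
  have hsplit : PySem.Chars.splitOn (PySem.Int.toChars value) ['.']
      = [PySem.Int.toChars value] := pv_splitOn_no_occ _ _ hdot
  by_cases hin : PySem.Chars.isIn sg.toList (PySem.Int.toChars value) = false
  · -- split_group does not occur: both sides group
    have hcnt : (PySem.Chars.count (PySem.Int.toChars value) sg.toList == 0) = true :=
      (pv_count_eq_zero_iff _ _).mpr hin
    cases ht : (PySem.Int.toChars value).reverse with
    | nil => exact absurd (by simpa using congrArg List.reverse ht) (pv_toChars_ne_nil value)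
    | cons x m =>
    have htt : PySem.Int.toChars value = m.reverse ++ [x] := by
      rw [← List.reverse_reverse (PySem.Int.toChars value), ht]; simp
    have hrfind : PySem.Chars.rfind (PySem.Int.toChars value) ['.'] = -1 :=
      pv_rfind_no_occ _ _ hdot
    have hslice1 : PySem.List.slice (PySem.Int.toChars value) none (some (-1))
        = m.reverse := by
      rw [PySem.List.slice_to_neg_one, htt, List.dropLast_concat]
    have hslice2 : PySem.List.slice (PySem.Int.toChars value) (some (-1)) none = [x] := by
      rw [PySem.List.slice_from_neg_one, htt]
      have hl : (m.reverse ++ [x]).length - 1 = m.reverse.length := by simp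
      rw [hl, List.drop_left]
    have hmem : ∀ c ∈ x :: m, sg.toList ≠ [c] := by
      intro c hc hsgc
      have hcmem : c ∈ PySem.Int.toChars value := by
        rw [← List.mem_reverse, ht]; exact hc
      have : sg.toList <:+: PySem.Int.toChars value := by
        rw [hsgc, List.singleton_infix_iff]; exact hcmem
      rw [PySem.Chars.isIn_eq_false_iff] at hin
      exact hin this
    have hmain := pv_main sg.toList m.length m x le_rfl hmem
    -- outside D_ the leading-separator condition of pv_main is false
    have hlen : (PySem.Int.toChars value).length = m.length + 1 := by
      have := congrArg List.length ht
      simp at this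
      omega
    have hnotinf : ¬ sg.toList <:+: PySem.Int.toChars value :=
      (PySem.Chars.isIn_eq_false_iff _ _).mp hin
    have hcond : ¬ ((m.length + 1) % 3 = 0 ∧ sg.toList.length ≠ 1) := by
      intro hc
      exact hpre ⟨hv, hnotinf, by rw [hlen]; exact hc.1, hc.2⟩
    rw [if_neg hcond] at hmain
    simp only [format_us_currency, format_us_currency_alt, hvb, Bool.false_eq_true,
      if_false, hsplit, List.headI_cons, hcnt, hrfind, hslice1, hslice2,
      List.reverse_reverse, hin, if_pos]
    rw [pv_foldl_eq_pvC sg.toList m [] 1, List.append_nil]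
    unfold pvStrip at hmain
    rw [hmain, List.nil_append, ht]
  · -- split_group occurs: both sides keep the string
    have hcnt : (PySem.Chars.count (PySem.Int.toChars value) sg.toList == 0) = false := by
      rcases Bool.eq_false_or_eq_true (PySem.Chars.count (PySem.Int.toChars value) sg.toList == 0) with h | h
      · exact absurd ((pv_count_eq_zero_iff _ _).mp h) hin
      · exact h
    simp only [format_us_currency, format_us_currency_alt, hvb, Bool.false_eq_true,
      if_false, hsplit, List.headI_cons, hcnt, hin]
    simp
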